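-- pv_equiv track=rewrite | github.com/PIBSAS/MicroPython_LilyGO_T_Display_S3_with_S3LCD | examples/draw_arc.py | sqrt_fraction
-- ===== SOURCE A (Python) =====
-- def sqrt_fraction(num):
--     # Compute the fixed point square root of an integer and
--     # return the 8 MS bits of the fractional part.
--     # Quicker than sqrt() for processors that do not have an FPU (e.g. RP2040)
--
--     if num > 0x40000000:
--         return 0
--
--     bsh = 0x00004000
--     fpr = 0
--     osh = 0
--
--     # Auto adjust from U8:8 up to U15:16
--     while num > bsh:
--         bsh <<= 2
--         osh += 1
--
--     while bsh > 0:
--         bod = bsh + fpr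
--         if num >= bod:
--             num -= bod
--             fpr = bsh + bod
--         num <<= 1
--         bsh >>= 1
--
--     return fpr >> osh
-- ===== SOURCE B (Python) =====
-- def _isqrt(n):
--     # Newton's method integer square root, n >= 0.
--     if n <= 1:
--         return n
--     x = 1 << ((n.bit_length() + 1) // 2)
--     while True:
--         y = (x + n // x) // 2
--         if y >= x:
--             return x
--         x = y
--
--
-- def sqrt_fraction(num):
--     # Fixed-point sqrt: 8 MS bits of the fractional part, via one integer
--     # square root instead of the bit-by-bit digit recurrence.
--     if num > 0x40000000 or num <= 0:
--         return 0
--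
--     bsh = 0x00004000
--     osh = 0
--
--     # Auto adjust from U8:8 up to U15:16 (same normalization as before)
--     while num > bsh:
--         bsh <<= 2
--         osh += 1
--
--     # bsh == 2**(14 + 2*osh), so num * bsh == num << (14 + 2*osh)
--     return (2 * _isqrt(num * bsh)) >> osh
-- ===== Notes on version B (the rewrite author's own statement) =====
-- stated objective: faster
-- what changed: The bit-by-bit restoring square-root digit recurrence (one iteration per result bit, ~15-31 iterations) is replaced by a single Newton-iteration integer square root: B keeps the same guard and normalization shift osh, then returns (2*isqrt(num << (14+2*osh))) >> osh.
import Mathlib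
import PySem

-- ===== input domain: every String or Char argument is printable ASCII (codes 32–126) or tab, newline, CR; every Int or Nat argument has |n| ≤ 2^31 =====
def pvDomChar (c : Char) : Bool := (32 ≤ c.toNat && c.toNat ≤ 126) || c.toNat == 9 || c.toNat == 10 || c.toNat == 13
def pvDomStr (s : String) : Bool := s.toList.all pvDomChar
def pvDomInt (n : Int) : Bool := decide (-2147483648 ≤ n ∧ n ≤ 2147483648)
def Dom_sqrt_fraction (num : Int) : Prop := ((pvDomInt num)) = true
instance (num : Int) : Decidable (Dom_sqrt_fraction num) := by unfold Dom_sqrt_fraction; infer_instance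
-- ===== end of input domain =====

-- B replaces A's bit-by-bit square-root digit recurrence by one Newton-iteration
-- integer square root (same guard and normalization shift): far fewer loop iterations.

-- ===== PORT A =====
-- 'while num > bsh: bsh <<= 2; osh += 1' — ported with fuel 64, which is exact for
-- every |num| ≤ 2^31 (the loop runs at most 9 times there; on Dom the fuel never runs out).
def pvA_loop1 : Nat → Int → Int → Int → Int × Int
  | 0, _, bsh, osh => (bsh, osh)
  | fuel+1, num, bsh, osh =>
    if num > bsh then pvA_loop1 fuel num (bsh <<< (2:Nat)) (osh + 1) else (bsh, osh)

-- 'while bsh > 0: …' — bsh strictly decreases, structural recursion on bsh.toNat.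
def pvA_loop2 (num fpr bsh : Int) : Int :=
  if 0 < bsh then
    let bod := bsh + fpr
    if bod ≤ num then pvA_loop2 ((num - bod) <<< (1:Nat)) (bsh + bod) (bsh >>> (1:Nat))
    else pvA_loop2 (num <<< (1:Nat)) fpr (bsh >>> (1:Nat))
  else fpr
termination_by bsh.toNat
decreasing_by
  all_goals
    have h2 : bsh >>> (1:Nat) = bsh / 2 := by rw [Int.shiftRight_eq_div_pow]; norm_num
    rw [h2]; omega

def sqrt_fraction (num : Int) : Int :=
  if num > 0x40000000 then 0
  else
    let p := pvA_loop1 64 num 0x00004000 0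
    -- 'return fpr >> osh': osh ≥ 0 always, so shifting by its Nat value is exact
    (pvA_loop2 num 0 p.1) >>> p.2.toNat

-- ===== PORT B =====
-- Newton loop of Source B's _isqrt; it only ever runs with n ≥ 2 and x ≥ 1, where
-- Nat division is exactly Python's '//'; 'while True' terminates because x decreases.
def pvB_newton (n x : Nat) : Nat :=
  let y := (x + n / x) / 2
  if x ≤ y then x else pvB_newton n y
termination_by x
decreasing_by omega

def pvB_isqrt (n : Int) : Int :=
  if n ≤ 1 then n
  else
    -- x = 1 << ((n.bit_length() + 1) // 2)
    ((pvB_newton n.toNat (1 <<< ((PySem.Int.bitLength n + 1) / 2)) : Nat) : Int)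

-- B's normalization loop (same three Python lines as in Source B), fuel 64 as for A
def pvB_loop1 : Nat → Int → Int → Int → Int × Int
  | 0, _, bsh, osh => (bsh, osh)
  | fuel+1, num, bsh, osh =>
    if num > bsh then pvB_loop1 fuel num (bsh <<< (2:Nat)) (osh + 1) else (bsh, osh)

def sqrt_fraction_alt (num : Int) : Int :=
  if num > 0x40000000 ∨ num ≤ 0 then 0
  else
    let p := pvB_loop1 64 num 0x00004000 0
    (2 * pvB_isqrt (num * p.1)) >>> p.2.toNat

-- ===== PRECONDITION & SPEC =====
def Spec_sqrt_fraction (num : Int) (out : Int) : Prop := out = sqrt_fraction_alt num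
instance (num : Int) (out : Int) : Decidable (Spec_sqrt_fraction num out) := by unfold Spec_sqrt_fraction; infer_instance

-- ===== CLAIM (what is proved, stated in full; the proofs are below) =====
def Claim_equal_sqrt_fraction : Prop := ∀ (num : Int), Dom_sqrt_fraction num → Spec_sqrt_fraction num (sqrt_fraction num)

-- ===== LEMMAS AND PROOFS =====

lemma pvB_loop1_eq (f : Nat) : ∀ (num bsh osh : Int), pvB_loop1 f num bsh osh = pvA_loop1 f num bsh osh := by
  induction f with
  | zero => intro num bsh osh; rfl
  | succ f ih =>
    intro num bsh osh
    by_cases h : num > bsh <;> simp [pvA_loop1, pvB_loop1, h, ih]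

lemma loop1_stop (f : Nat) (num bsh osh : Int) (h : ¬ bsh < num) :
    pvA_loop1 f num bsh osh = (bsh, osh) := by
  cases f <;> simp [pvA_loop1, h]

lemma loop1_spec (f : Nat) : ∀ (k : Nat) (num : Int), num ≤ 2^(14+2*k+2*f) →
    ∃ t : Nat, pvA_loop1 f num ((2:Int)^(14+2*k)) (k : Int) = ((2:Int)^(14+2*t), (t : Int)) ∧
      num ≤ 2^(14+2*t) := by
  induction f with
  | zero =>
    intro k num h
    exact ⟨k, rfl, by simpa using h⟩
  | succ f ih =>
    intro k num h
    by_cases hc : (2:Int)^(14+2*k) < num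
    · have hsh : ((2:Int)^(14+2*k)) <<< (2:Nat) = (2:Int)^(14+2*(k+1)) := by
        rw [Int.shiftLeft_eq, ← pow_add]; ring_nf
      have hb : num ≤ 2^(14+2*(k+1)+2*f) := by
        have : 14+2*k+2*(f+1) = 14+2*(k+1)+2*f := by ring
        rwa [this] at h
      obtain ⟨t, ht, hle⟩ := ih (k+1) num hb
      refine ⟨t, ?_, hle⟩
      simp only [pvA_loop1, gt_iff_lt, if_pos hc, hsh]
      rw [show ((k:Int)+1) = ((k+1 : Nat) : Int) by push_cast; ring]
      exact ht
    · exact ⟨k, loop1_stop _ num _ _ hc, by omega⟩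

lemma sqrt_eq_of (q K : Nat) (h1 : q*q ≤ K) (h2 : K < (q+1)*(q+1)) : Nat.sqrt K = q := by
  have h3 := Nat.le_sqrt.mpr h1
  have h4 := Nat.sqrt_lt.mpr h2
  omega

lemma loop2_zero (num fpr : Int) : pvA_loop2 num fpr 0 = fpr := by
  rw [pvA_loop2]; simp

lemma loop2_inv : ∀ (m : Nat), ∀ (K r : Nat), r^2 * 2^(m+2) ≤ K → K < (r+1)^2 * 2^(m+2) →
    pvA_loop2 ((K : Int) - (r : Int)^2 * 2^(m+2)) ((r : Int) * 2^(m+2)) ((2:Int)^m)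
      = 2 * (Nat.sqrt (K * 2^m) : Int) := by
  intro m
  induction m with
  | zero =>
    intro K r h1 h2
    rw [pvA_loop2, if_pos (by positivity)]
    dsimp only
    have h2' : K < (2*r+2)*(2*r+2) := by
      have e2 : (r+1)^2*2^(0+2) = (2*r+2)*(2*r+2) := by ring
      omega
    by_cases hc : (2*r+1)*(2*r+1) ≤ K
    · have hcI : ((2*r+1)*(2*r+1) : Int) ≤ (K : Int) := by exact_mod_cast hc
      rw [if_pos (by push_cast; nlinarith [hcI])]
      rw [show ((2:Int)^0) >>> (1:Nat) = 0 from by decide, loop2_zero]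
      have hs : Nat.sqrt (K * 2^0) = 2*r+1 := by
        rw [pow_zero, mul_one]
        exact sqrt_eq_of _ _ hc (by nlinarith)
      rw [hs]; push_cast; ring
    · have hcI : (K : Int) < ((2*r+1)*(2*r+1) : Int) := by exact_mod_cast Nat.lt_of_not_le hc
      rw [if_neg (by push_cast; nlinarith [hcI])]
      rw [show ((2:Int)^0) >>> (1:Nat) = 0 from by decide, loop2_zero]
      have hs : Nat.sqrt (K * 2^0) = 2*r := by
        rw [pow_zero, mul_one]
        have e1 : r^2*2^(0+2) = 2*r*(2*r) := by ring
        exact sqrt_eq_of _ _ (by omega) (by have := Nat.lt_of_not_le hc; omega)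
      rw [hs]; push_cast; ring
  | succ m ih =>
    intro K r h1 h2
    rw [pvA_loop2, if_pos (by positivity)]
    dsimp only
    have hsr : ((2:Int)^(m+1)) >>> (1:Nat) = 2^m := by
      rw [Int.shiftRight_eq_div_pow, pow_one, pow_succ]
      exact Int.mul_ediv_cancel _ (by norm_num)
    by_cases hc : (2*r+1)^2 * 2^(m+1) ≤ K
    · have hcI : (((2*r+1)^2 * 2^(m+1) : Nat) : Int) ≤ (K : Int) := by exact_mod_cast hc
      push_cast at hcI
      rw [if_pos (by
        rw [pow_succ] at hcI
        push_cast [pow_add]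
        ring_nf at hcI ⊢
        linarith [hcI])]
      have eq1 : (((K : Int) - (r : Int)^2 * 2^(m+1+2)) - ((2:Int)^(m+1) + (r : Int) * 2^(m+1+2))) <<< (1:Nat)
          = ((2*K : Nat) : Int) - ((2*r+1 : Nat) : Int)^2 * 2^(m+2) := by
        rw [Int.shiftLeft_eq, pow_one]; push_cast [pow_add]; ring
      have eq2 : ((2:Int)^(m+1)) + ((2:Int)^(m+1) + (r : Int) * 2^(m+1+2))
          = ((2*r+1 : Nat) : Int) * 2^(m+2) := by
        push_cast [pow_add]; ring
      have H1 : (2*r+1)^2 * 2^(m+2) ≤ 2*K := by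
        have e : (2*r+1)^2 * 2^(m+2) = 2 * ((2*r+1)^2 * 2^(m+1)) := by rw [pow_succ]; ring
        omega
      have H2 : 2*K < (2*r+1+1)^2 * 2^(m+2) := by
        have e : (2*r+1+1)^2 * 2^(m+2) = 2 * ((r+1)^2 * 2^(m+1+2)) := by
          rw [pow_add, pow_add]; ring
        omega
      have hrec := ih (2*K) (2*r+1) H1 H2
      rw [eq1, eq2, hsr, hrec, show 2*K*2^m = K*2^(m+1) from by rw [pow_succ]; ring]
    · have hcI : (K : Int) < (((2*r+1)^2 * 2^(m+1) : Nat) : Int) := by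
        exact_mod_cast Nat.lt_of_not_le hc
      push_cast at hcI
      rw [if_neg (by
        rw [pow_succ] at hcI
        simp only [not_le]
        push_cast [pow_add]
        ring_nf at hcI ⊢
        linarith [hcI])]
      have eq1 : ((K : Int) - (r : Int)^2 * 2^(m+1+2)) <<< (1:Nat)
          = ((2*K : Nat) : Int) - ((2*r : Nat) : Int)^2 * 2^(m+2) := by
        rw [Int.shiftLeft_eq, pow_one]; push_cast [pow_add]; ring
      have eq2 : ((r : Int) * 2^(m+1+2)) = ((2*r : Nat) : Int) * 2^(m+2) := by
        push_cast [pow_add]; ring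
      have H1 : (2*r)^2 * 2^(m+2) ≤ 2*K := by
        have e : (2*r)^2 * 2^(m+2) = 2 * (r^2 * 2^(m+1+2)) := by rw [pow_add, pow_add]; ring
        omega
      have H2 : 2*K < (2*r+1)^2 * 2^(m+2) := by
        have e : (2*r+1)^2 * 2^(m+2) = 2 * ((2*r+1)^2 * 2^(m+1)) := by rw [pow_succ]; ring
        have := Nat.lt_of_not_le hc
        omega
      have hrec := ih (2*K) (2*r) H1 H2
      rw [eq1, eq2, hsr, hrec, show 2*K*2^m = K*2^(m+1) from by rw [pow_succ]; ring]

lemma loop2_nonpos : ∀ (n : Nat) (bsh num : Int), bsh.toNat ≤ n → num ≤ 0 →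
    pvA_loop2 num 0 bsh = 0 := by
  intro n
  induction n with
  | zero =>
    intro bsh num hb hn
    rw [pvA_loop2, if_neg (by omega)]
  | succ n ih =>
    intro bsh num hb hn
    rw [pvA_loop2]
    by_cases h : 0 < bsh
    · rw [if_pos h]
      simp only [add_zero]
      rw [if_neg (by omega)]
      have h2 : bsh >>> (1:Nat) = bsh / 2 := by rw [Int.shiftRight_eq_div_pow]; norm_num
      refine ih _ _ (by rw [h2]; omega) ?_
      rw [Int.shiftLeft_eq]; norm_num; omega
    · rw [if_neg h]

lemma newton_y_ge (n x : Nat) (hx : 1 ≤ x) : Nat.sqrt n ≤ (x + n / x) / 2 := by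
  set s := Nat.sqrt n with hs
  rw [Nat.le_div_iff_mul_le (by omega : 0 < 2)]
  by_cases h : 2*s ≤ x
  · have := Nat.le_add_right x (n / x)
    omega
  · have hss : s * s ≤ n := by
      have h0 := Nat.sqrt_le' n
      rw [pow_two] at h0
      exact h0
    have h1 : (2*s - x) * x ≤ n := by
      refine le_trans ?_ hss
      zify [le_of_lt (by omega : x < 2*s)]
      nlinarith [sq_nonneg ((s:Int) - x)]
    have h2 : 2*s - x ≤ n / x := (Nat.le_div_iff_mul_le (by omega)).mpr h1
    omega

lemma newton_correct : ∀ (x n : Nat), Nat.sqrt n ≤ x → pvB_newton n x = Nat.sqrt n := by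
  intro x
  induction x using Nat.strong_induction_on with
  | _ x ih =>
    intro n hs
    rw [pvB_newton]
    by_cases hxy : x ≤ (x + n / x) / 2
    · rw [if_pos hxy]
      rcases Nat.eq_zero_or_pos x with hx0 | hx1
      · subst hx0; omega
      · have h2 : x * 2 ≤ x + n / x := (Nat.le_div_iff_mul_le (by omega)).mp hxy
        have h3 : x ≤ n / x := by omega
        have h4 : x * x ≤ n := (Nat.le_div_iff_mul_le hx1).mp h3
        have h5 : x ≤ Nat.sqrt n := Nat.le_sqrt.mpr h4
        omega
    · rw [if_neg hxy]
      have hx1 : 1 ≤ x := by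
        rcases Nat.eq_zero_or_pos x with rfl | h1
        · simp at hxy
        · exact h1
      exact ih _ (by omega) n (newton_y_ge n x hx1)

lemma isqrt_eq (n : Int) (hn : 0 ≤ n) : pvB_isqrt n = (Nat.sqrt n.toNat : Int) := by
  unfold pvB_isqrt
  by_cases h : n ≤ 1
  · rw [if_pos h]
    interval_cases n <;> simp
  · rw [if_neg h]
    congr 1
    apply newton_correct
    have hbl := PySem.Int.lt_two_pow_bitLength n
    have hna : n.natAbs = n.toNat := by omega
    rw [hna] at hbl
    set bl := PySem.Int.bitLength n
    have hx : (1 <<< ((bl + 1) / 2) : Nat) = 2^((bl+1)/2) := Nat.one_shiftLeft _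
    rw [hx]
    have h2 : n.toNat < 2^((bl+1)/2) * 2^((bl+1)/2) := by
      calc n.toNat < 2^bl := hbl
        _ ≤ 2^((bl+1)/2 + (bl+1)/2) := Nat.pow_le_pow_right (by omega) (by omega)
        _ = 2^((bl+1)/2) * 2^((bl+1)/2) := by rw [pow_add]
    exact le_of_lt (Nat.sqrt_lt.mpr h2)

-- ===== VERDICT (by name: the statement is the Claim_ definition above) =====
theorem sqrt_fraction_spec : Claim_equal_sqrt_fraction := by
  intro num hdom
  have hdom' : -2147483648 ≤ num ∧ num ≤ 2147483648 := by
    unfold Dom_sqrt_fraction pvDomInt at hdom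
    simpa using hdom
  unfold Spec_sqrt_fraction sqrt_fraction sqrt_fraction_alt
  by_cases hbig : num > (0x40000000:Int)
  · rw [if_pos hbig, if_pos (Or.inl hbig)]
  · by_cases hpos : num ≤ 0
    · have hl1 : pvA_loop1 64 num 0x00004000 0 = (0x00004000, 0) :=
        loop1_stop 64 num _ _ (by omega)
      rw [if_neg hbig, if_pos (Or.inr hpos)]
      simp only [hl1]
      rw [loop2_nonpos 16384 _ num (by norm_num) hpos]
      decide
    · have hnum : num ≤ 2^(14+2*0+2*64) := by
        calc num ≤ 0x40000000 := by omega
          _ ≤ 2^(14+2*0+2*64) := by norm_num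
      obtain ⟨t, ht, hle⟩ := loop1_spec 64 0 num hnum
      have ht' : pvA_loop1 64 num 0x00004000 0 = ((2:Int)^(14+2*t), (t:Int)) := by
        have e : ((2:Int)^(14+2*0)) = 0x00004000 := by norm_num
        rw [← e]
        exact_mod_cast ht
      have h0 : 0 ≤ num := by omega
      rw [if_neg hbig, if_neg (not_or.mpr ⟨hbig, hpos⟩)]
      simp only [pvB_loop1_eq, ht']
      have hKb : num.toNat < (0+1)^2 * 2^(14+2*t+2) := by
        have hCn : ((2^(14+2*t) : Nat) : Int) = (2:Int)^(14+2*t) := by push_cast; rfl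
        have h1 : num.toNat ≤ 2^(14+2*t) := by
          rw [← hCn] at hle; omega
        have h2 : (2^(14+2*t) : Nat) < (0+1)^2 * 2^(14+2*t+2) := by
          simp only [zero_add, one_pow, one_mul]
          exact Nat.pow_lt_pow_right (by norm_num) (by omega)
        omega
      have hA : pvA_loop2 num 0 ((2:Int)^(14+2*t)) = 2 * (Nat.sqrt (num.toNat * 2^(14+2*t)) : Int) := by
        have h := loop2_inv (14+2*t) num.toNat 0 (by simp) hKb
        simpa [Int.toNat_of_nonneg h0] using h
      have hB : pvB_isqrt (num * 2^(14+2*t)) = (Nat.sqrt (num.toNat * 2^(14+2*t)) : Int) := by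
        rw [isqrt_eq _ (by positivity)]
        congr 1
        conv_lhs => rw [show num * (2:Int)^(14+2*t) = ((num.toNat * 2^(14+2*t) : Nat) : Int) from by
          conv_lhs => rw [← Int.toNat_of_nonneg h0]
          push_cast; ring]
        rw [Int.toNat_natCast]
      rw [hA, hB]
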